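-- pv_equiv track=rewrite | github.com/bc36/leetcode | Python/lc1500_1599.py | getWinner
-- ===== SOURCE A (Python) =====
-- from typing import List, Optional, Tuple
--
-- def getWinner(arr: List[int], k: int) -> int:
--     mx = arr[0]
--     win = -1  # 对于 arr[0] 来说，需要连续 k+1 个回合都是最大值
--     for x in arr:
--         if x > mx:
--             mx = x
--             win = 0
--         win += 1
--         if win == k:
--             break
--     return mx
-- ===== SOURCE B (Python) =====
-- def getWinner(arr, k):
--     # Walks the strictly increasing chain of prefix maxima; for each champion an
--     # inner scan finds the next strictly greater element, and a closed-form
--     # streak test replaces A's per-element win counter.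
--     n = len(arr)
--     i = 0
--     while True:
--         j = i + 1
--         while j < n and arr[j] <= arr[i]:
--             j += 1
--         if j == n:
--             return arr[i]
--         lo = 0 if i == 0 else 1
--         if lo <= k <= lo + (j - i - 1):
--             return arr[i]
--         i = j
-- ===== Notes on version B (the rewrite author's own statement) =====
-- stated objective: alternative
-- what changed: Replaces A's single running-max scan with a per-element win counter by a walk over the strictly increasing chain of prefix maxima: for each champion one inner scan finds the next strictly greater element and a closed-form streak test decides whether it reaches k wins.
import Mathlib
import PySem

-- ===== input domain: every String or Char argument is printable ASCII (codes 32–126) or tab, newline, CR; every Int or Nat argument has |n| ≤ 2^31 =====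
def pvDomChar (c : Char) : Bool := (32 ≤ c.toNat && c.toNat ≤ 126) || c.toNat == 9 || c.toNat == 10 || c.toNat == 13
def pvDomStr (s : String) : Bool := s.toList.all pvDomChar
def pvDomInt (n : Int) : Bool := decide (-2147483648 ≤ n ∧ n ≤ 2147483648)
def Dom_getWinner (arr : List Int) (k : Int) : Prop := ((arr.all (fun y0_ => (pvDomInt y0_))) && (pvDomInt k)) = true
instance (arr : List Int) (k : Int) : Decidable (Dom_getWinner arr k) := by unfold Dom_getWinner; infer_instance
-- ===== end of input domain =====

-- B walks the chain of prefix maxima with a closed-form streak test instead of A's running-max scan with a per-element win counter; same O(n) cost, equal return values on all non-empty inputs.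

-- ===== PORT A =====
-- A's for-loop with break, state (mx, win); step order as in Python: update on x > mx, win += 1, break check.
def aLoop (k : Int) : List Int → Int → Int → Int
  | [], mx, _ => mx
  | x :: xs, mx, win =>
    let mx' := if mx < x then x else mx
    let win' := (if mx < x then 0 else win) + 1
    if win' = k then mx' else aLoop k xs mx' win'

def getWinner (arr : List Int) (k : Int) : Int :=
  aLoop k arr ((PySem.List.pyGet? arr 0).getD 0) (-1)

-- ===== PORT B =====
-- inner while: advance j past elements ≤ the champion (fuel n - j makes the while structural)
def altInner (arr : List Int) (c : Int) : Nat → Nat → Nat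
  | j, 0 => j
  | j, fuel + 1 =>
    if j < arr.length ∧ arr.getD j 0 ≤ c then altInner arr c (j + 1) fuel else j

-- outer while True over champion indices i (strictly increasing, so fuel n suffices)
def altOuter (arr : List Int) (k : Int) : Nat → Nat → Int
  | i, 0 => arr.getD i 0
  | i, fuel + 1 =>
    let j := altInner arr (arr.getD i 0) (i + 1) (arr.length - (i + 1))
    if j = arr.length then arr.getD i 0
    else
      let lo : Int := if i = 0 then 0 else 1
      if lo ≤ k ∧ k ≤ lo + ((j : Int) - (i : Int) - 1) then arr.getD i 0
      else altOuter arr k j fuel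

def getWinner_alt (arr : List Int) (k : Int) : Int :=
  altOuter arr k 0 arr.length

-- ===== PRECONDITION & SPEC =====
-- Pre_ excludes only the empty list, where A raises IndexError on arr[0].
def Pre_getWinner (arr : List Int) (k : Int) : Prop := arr ≠ []
instance (arr : List Int) (k : Int) : Decidable (Pre_getWinner arr k) := by unfold Pre_getWinner; infer_instance
def pvWitness_getWinner : List Int × Int := ([3, 1, 2], 2)

def Spec_getWinner (arr : List Int) (k : Int) (out : Int) : Prop := out = getWinner_alt arr k
instance (arr : List Int) (k : Int) (out : Int) : Decidable (Spec_getWinner arr k out) := by unfold Spec_getWinner; infer_instance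

-- ===== CLAIM (what is proved, stated in full; the proofs are below) =====
def Claim_equal_getWinner : Prop := ∀ (arr : List Int) (k : Int), Dom_getWinner arr k → Pre_getWinner arr k → Spec_getWinner arr k (getWinner arr k)

-- ===== LEMMAS AND PROOFS =====

theorem altInner_ge (arr : List Int) (c : Int) : ∀ fuel j, j ≤ altInner arr c j fuel := by
  intro fuel
  induction fuel with
  | zero => intro j; simp [altInner]
  | succ f ih =>
    intro j
    simp only [altInner]
    split
    · exact le_trans (Nat.le_succ j) (ih (j + 1))
    · exact le_refl j

theorem altInner_le (arr : List Int) (c : Int) : ∀ fuel j, altInner arr c j fuel ≤ j + fuel := by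
  intro fuel
  induction fuel with
  | zero => intro j; simp [altInner]
  | succ f ih =>
    intro j
    simp only [altInner]
    split
    · exact le_trans (ih (j + 1)) (by omega)
    · omega

theorem altInner_step (arr : List Int) (c : Int) (j : Nat) (hj : j < arr.length)
    (hle : arr.getD j 0 ≤ c) :
    altInner arr c j (arr.length - j) = altInner arr c (j + 1) (arr.length - (j + 1)) := by
  have h : arr.length - j = (arr.length - (j + 1)) + 1 := by omega
  rw [h]
  show (if j < arr.length ∧ arr.getD j 0 ≤ c then altInner arr c (j + 1) (arr.length - (j + 1))
        else j) = _
  rw [if_pos ⟨hj, hle⟩]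

theorem altInner_stop (arr : List Int) (c : Int) (j f : Nat)
    (hgt : c < arr.getD j 0) :
    altInner arr c j f = j := by
  cases f with
  | zero => rfl
  | succ f =>
    show (if j < arr.length ∧ arr.getD j 0 ≤ c then altInner arr c (j + 1) f else j) = j
    rw [if_neg]
    intro ⟨_, h2⟩
    omega

-- segment lemma: A's loop from position j with champion c and win count w, versus
-- the inner scan's stopping point J = altInner arr c j (n - j).
theorem aLoop_seg (arr : List Int) (k c : Int) :
    ∀ m j w, arr.length - j = m → j ≤ arr.length →
    aLoop k (arr.drop j) c w =
      (if w < k ∧ k ≤ w + ((altInner arr c j (arr.length - j) : Int) - (j : Int)) then c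
       else if altInner arr c j (arr.length - j) = arr.length then c
       else
         if (1 : Int) = k then arr.getD (altInner arr c j (arr.length - j)) 0
         else aLoop k (arr.drop (altInner arr c j (arr.length - j) + 1))
                (arr.getD (altInner arr c j (arr.length - j)) 0) 1) := by
  intro m
  induction m with
  | zero =>
    intro j w hm hj
    have hjn : j = arr.length := by omega
    subst hjn
    rw [hm]
    simp only [List.drop_length, aLoop, altInner]
    split_ifs <;> first | rfl | omega
  | succ m ih =>
    intro j w hm hj
    have hjlt : j < arr.length := by omega
    have hdrop : arr.drop j = arr.getD j 0 :: arr.drop (j + 1) := by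
      have h1 := List.getElem_cons_drop (as := arr) (i := j) hjlt
      rw [← h1]
      congr 1
      simp [List.getD, List.getElem?_eq_getElem hjlt]
    by_cases hx : c < arr.getD j 0
    · -- new champion at j
      have hJ : altInner arr c j (arr.length - j) = j := altInner_stop arr c j _ hx
      rw [hdrop, hJ]
      show (if ((if c < arr.getD j 0 then 0 else w) + 1) = k
              then (if c < arr.getD j 0 then arr.getD j 0 else c)
              else aLoop k (arr.drop (j + 1)) (if c < arr.getD j 0 then arr.getD j 0 else c)
                     ((if c < arr.getD j 0 then 0 else w) + 1)) = _
      simp only [if_pos hx]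
      rw [if_neg (by intro ⟨h1, h2⟩; omega : ¬ (w < k ∧ k ≤ w + ((j : Int) - (j : Int))))]
      rw [if_neg (by omega : ¬ j = arr.length)]
      by_cases hk : (0 : Int) + 1 = k
      · rw [if_pos hk, if_pos (by omega : (1 : Int) = k)]
      · rw [if_neg hk, if_neg (by omega : ¬ (1 : Int) = k)]
        norm_num
    · -- champion keeps winning at j
      rw [not_lt] at hx
      have hJstep := altInner_step arr c j hjlt hx
      have hJge : j + 1 ≤ altInner arr c (j + 1) (arr.length - (j + 1)) :=
        altInner_ge arr c (arr.length - (j + 1)) (j + 1)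
      rw [hdrop, hJstep]
      show (if ((if c < arr.getD j 0 then 0 else w) + 1) = k
              then (if c < arr.getD j 0 then arr.getD j 0 else c)
              else aLoop k (arr.drop (j + 1)) (if c < arr.getD j 0 then arr.getD j 0 else c)
                     ((if c < arr.getD j 0 then 0 else w) + 1)) = _
      simp only [if_neg (show ¬ c < arr.getD j 0 by omega)]
      rw [ih (j + 1) (w + 1) (by omega) (by omega)]
      have hJZ : (j : Int) + 1 ≤ ((altInner arr c (j + 1) (arr.length - (j + 1)) : Nat) : Int) := by
        exact_mod_cast hJge
      push_cast
      split_ifs <;> first | rfl | omega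

-- outer lemma: A's loop just after champion arr[i] was installed equals altOuter from i.
theorem outer_eq (arr : List Int) (k : Int) :
    ∀ fuel i, i < arr.length → arr.length - i ≤ fuel →
    (if (if i = 0 then (0 : Int) else 1) = k then arr.getD i 0
     else aLoop k (arr.drop (i + 1)) (arr.getD i 0) (if i = 0 then (0 : Int) else 1)) =
    altOuter arr k i fuel := by
  intro fuel
  induction fuel with
  | zero => intro i h1 h2; omega
  | succ f ih =>
    intro i hi hfuel
    simp only [altOuter]
    set w : Int := if i = 0 then (0 : Int) else 1 with hw
    set J := altInner arr (arr.getD i 0) (i + 1) (arr.length - (i + 1)) with hJdef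
    have hJge : i + 1 ≤ J := altInner_ge arr (arr.getD i 0) _ (i + 1)
    have hJle : J ≤ arr.length := by
      have h1 := altInner_le arr (arr.getD i 0) (arr.length - (i + 1)) (i + 1)
      omega
    have hJZ : (i : Int) + 1 ≤ (J : Int) := by exact_mod_cast hJge
    have hseg := aLoop_seg arr k (arr.getD i 0) (arr.length - (i + 1)) (i + 1) w rfl (by omega)
    rw [← hJdef] at hseg
    by_cases hk : w = k
    · -- A broke at index i already; B's streak window contains k
      rw [if_pos hk]
      by_cases hJn : J = arr.length
      · rw [if_pos hJn]
      · rw [if_neg hJn]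
        rw [if_pos (by constructor <;> omega : w ≤ k ∧ k ≤ w + ((J : Int) - (i : Int) - 1))]
    · rw [if_neg hk, hseg]
      push_cast
      by_cases hc : w < k ∧ k ≤ w + ((J : Int) - ((i : Int) + 1))
      · rw [if_pos hc]
        by_cases hJn : J = arr.length
        · rw [if_pos hJn]
        · rw [if_neg hJn, if_pos (by constructor <;> omega : w ≤ k ∧ k ≤ w + ((J : Int) - (i : Int) - 1))]
      · rw [if_neg hc]
        by_cases hJn : J = arr.length
        · rw [if_pos hJn, if_pos hJn]
        · rw [if_neg hJn, if_neg hJn]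
          rw [if_neg (by intro ⟨h1, h2⟩; exact hc ⟨by omega, by omega⟩ : ¬ (w ≤ k ∧ k ≤ w + ((J : Int) - (i : Int) - 1)))]
          have hJpos : ¬ J = 0 := by omega
          have hIH := ih J (by omega) (by omega)
          rw [if_neg hJpos] at hIH
          exact hIH

theorem getWinner_eq_alt (arr : List Int) (k : Int) (h : arr ≠ []) :
    getWinner arr k = getWinner_alt arr k := by
  obtain ⟨a, rest, rfl⟩ : ∃ a rest, arr = a :: rest := by
    cases arr with
    | nil => exact absurd rfl h
    | cons a rest => exact ⟨a, rest, rfl⟩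
  have hget0 : ((PySem.List.pyGet? (a :: rest) 0).getD 0) = a := by
    simp [PySem.List.pyGet?, PySem.List.pyIdx?]
  have hO := outer_eq (a :: rest) k (a :: rest).length 0 (by simp) (by omega)
  rw [if_pos rfl] at hO
  unfold getWinner getWinner_alt
  rw [hget0]
  show (if ((if a < a then 0 else (-1 : Int)) + 1) = k
          then (if a < a then a else a)
          else aLoop k rest (if a < a then a else a) ((if a < a then 0 else (-1 : Int)) + 1)) = _
  simp only [if_neg (lt_irrefl a)]
  norm_num
  norm_num at hO
  convert hO using 2

theorem getWinner_spec : Claim_equal_getWinner := by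
  intro arr k _ hpre
  unfold Spec_getWinner
  exact getWinner_eq_alt arr k hpre
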